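-- pv_equiv track=rewrite | github.com/iolosquires/modified-peptide-analysis | functions/ppa_functions.py | lowercase_modified_residue
-- ===== SOURCE A (Python) =====
-- def lowercase_modified_residue(peptide, pos):
--     replace_dict = {"S": "s", "T": "t", "Y": "y", "m": "M", "C": "c", "K": "k"}
--     new = []
--     for index, letter in enumerate(peptide):
--         if index + 1 in pos:
--             new.append(replace_dict.get(letter, letter))
--         else:
--             new.append(letter)
--
--     return "".join(new)
-- ===== SOURCE B (Python) =====
-- def lowercase_modified_residue(peptide, pos):
--     replace_dict = {"S": "s", "T": "t", "Y": "y", "m": "M", "C": "c", "K": "k"}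
--     chars = list(peptide)
--     for p in pos:
--         if 1 <= p <= len(chars):
--             c = chars[p - 1]
--             chars[p - 1] = replace_dict.get(c, c)
--     return "".join(chars)
-- ===== Notes on version B (the rewrite author's own statement) =====
-- stated objective: faster
-- what changed: Instead of scanning every residue and testing 'index+1 in pos' (an inner list scan), B converts the peptide to a char list once and loops only over the positions, updating in-range sites by direct indexing.
import Mathlib
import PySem

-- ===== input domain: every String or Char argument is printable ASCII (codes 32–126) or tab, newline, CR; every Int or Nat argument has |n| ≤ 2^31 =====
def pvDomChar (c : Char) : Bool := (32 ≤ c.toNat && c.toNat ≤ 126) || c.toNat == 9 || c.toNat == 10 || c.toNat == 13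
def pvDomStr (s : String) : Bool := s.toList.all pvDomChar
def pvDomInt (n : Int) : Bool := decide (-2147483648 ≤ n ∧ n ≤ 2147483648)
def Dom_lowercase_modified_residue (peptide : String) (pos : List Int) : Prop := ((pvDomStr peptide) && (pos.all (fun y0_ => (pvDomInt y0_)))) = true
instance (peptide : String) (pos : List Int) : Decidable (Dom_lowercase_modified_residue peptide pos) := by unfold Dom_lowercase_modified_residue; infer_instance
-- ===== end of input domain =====

-- B replaces A's per-residue scan (with its 'index+1 in pos' inner test) by a loop over pos that
-- updates the in-range modification sites by direct indexing (objective: faster).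

-- ===== PORT A =====
-- the replace_dict literal and the expression replace_dict.get(letter, letter), shared by both Pythons
def pvReplDict : PySem.Dict Char Char :=
  PySem.Dict.mk [('S','s'), ('T','t'), ('Y','y'), ('m','M'), ('C','c'), ('K','k')]
def pvR (c : Char) : Char := (PySem.Dict.get? pvReplDict c).getD c

def lowercase_modified_residue (peptide : String) (pos : List Int) : String :=
  String.mk ((PySem.List.enumerate peptide.toList).foldl
    (fun new p =>
      if pos.contains (p.1 + 1) then new ++ [pvR p.2]
      else new ++ [p.2]) [])

-- ===== PORT B =====
-- one step of B's loop over pos; the getD default is never used: the guard puts the index in range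
def pvStepB (chars : List Char) (p : Int) : List Char :=
  if 1 ≤ p ∧ p ≤ (chars.length : Int) then
    chars.set (p - 1).toNat (pvR (chars.getD (p - 1).toNat ' '))
  else chars

def lowercase_modified_residue_alt (peptide : String) (pos : List Int) : String :=
  String.mk (pos.foldl pvStepB peptide.toList)

-- ===== PRECONDITION & SPEC =====
def Spec_lowercase_modified_residue (peptide : String) (pos : List Int) (out : String) : Prop := out = lowercase_modified_residue_alt peptide pos
instance (peptide : String) (pos : List Int) (out : String) : Decidable (Spec_lowercase_modified_residue peptide pos out) := by unfold Spec_lowercase_modified_residue; infer_instance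

-- ===== CLAIM (what is proved, stated in full; the proofs are below) =====
def Claim_equal_lowercase_modified_residue : Prop := ∀ (peptide : String) (pos : List Int), Dom_lowercase_modified_residue peptide pos → Spec_lowercase_modified_residue peptide pos (lowercase_modified_residue peptide pos)

-- ===== LEMMAS AND PROOFS =====

lemma pvR_eq (c : Char) : pvR c =
    if c = 'S' then 's' else if c = 'T' then 't' else if c = 'Y' then 'y'
    else if c = 'm' then 'M' else if c = 'C' then 'c' else if c = 'K' then 'k' else c := by
  unfold pvR pvReplDict
  split_ifs with h1 h2 h3 h4 h5 h6
  · subst h1; decide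
  · subst h2; decide
  · subst h3; decide
  · subst h4; decide
  · subst h5; decide
  · subst h6; decide
  · simp [PySem.Dict.get?,
      Ne.symm h1, Ne.symm h2, Ne.symm h3, Ne.symm h4, Ne.symm h5, Ne.symm h6]

lemma pvR_idem (c : Char) : pvR (pvR c) = pvR c := by
  by_cases h1 : c = 'S'; · subst h1; decide
  by_cases h2 : c = 'T'; · subst h2; decide
  by_cases h3 : c = 'Y'; · subst h3; decide
  by_cases h4 : c = 'm'; · subst h4; decide
  by_cases h5 : c = 'C'; · subst h5; decide
  by_cases h6 : c = 'K'; · subst h6; decide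
  have hc : pvR c = c := by
    rw [pvR_eq]
    simp [h1, h2, h3, h4, h5, h6]
  rw [hc, hc]

lemma pvStepB_length (chars : List Char) (p : Int) : (pvStepB chars p).length = chars.length := by
  unfold pvStepB; split <;> simp

-- main invariant: B's fold, read at index i, is A's per-residue value
lemma pvFoldB_getElem (pos : List Int) : ∀ (l : List Char) (i : Nat) (h : i < l.length),
    (pos.foldl pvStepB l)[i]? =
      some (if pos.contains ((i : Int) + 1) then pvR (l[i]'h) else l[i]'h) := by
  induction pos with
  | nil =>
    intro l i h
    simp [List.getElem?_eq_getElem h]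
  | cons p ps ih =>
    intro l i h
    rw [List.foldl_cons]
    have hlen : i < (pvStepB l p).length := by rw [pvStepB_length]; exact h
    rw [ih (pvStepB l p) i hlen]
    unfold pvStepB
    by_cases hg : 1 ≤ p ∧ p ≤ (l.length : Int)
    · simp only [if_pos hg]
      have hj : (p - 1).toNat < l.length := by omega
      by_cases hpi : p = (i : Int) + 1
      · have hji : (p - 1).toNat = i := by omega
        subst hji
        simp only [List.getD_eq_getElem l ' ' h]
        have hset : (l.set (p - 1).toNat (pvR (l[(p - 1).toNat]'h)))[(p - 1).toNat]'(by simpa using h)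
            = pvR (l[(p - 1).toNat]'h) :=
          List.getElem_set_self (by simpa using h)
        have hcm : (p :: ps).contains (((p - 1).toNat : Int) + 1) = true := by
          simp only [List.contains_cons]
          rw [show (((((p - 1).toNat : Int) + 1)) == p) = true by simp [beq_iff_eq]; omega]
          simp
        rw [hcm]
        by_cases hr : ps.contains (((p - 1).toNat : Int) + 1) = true
        · rw [if_pos hr, if_pos rfl]
          congr 1
          rw [hset, pvR_idem]
        · rw [if_neg hr, if_pos rfl]
          rw [hset]
      · have hji : (p - 1).toNat ≠ i := by omega
        rw [List.getElem_set_ne hji]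
        have hcm : (p :: ps).contains ((i : Int) + 1) = ps.contains ((i : Int) + 1) := by
          simp only [List.contains_cons]
          rw [show ((((i : Int) + 1)) == p) = false by simp [beq_eq_false_iff_ne]; omega]
          simp
        rw [hcm]
    · simp only [if_neg hg]
      have hpi : p ≠ (i : Int) + 1 := by omega
      have hcm : (p :: ps).contains ((i : Int) + 1) = ps.contains ((i : Int) + 1) := by
        simp only [List.contains_cons]
        rw [show ((((i : Int) + 1)) == p) = false by simp [beq_eq_false_iff_ne]; omega]
        simp
      rw [hcm]

lemma pvFoldB_length (pos : List Int) : ∀ (chars : List Char),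
    (pos.foldl pvStepB chars).length = chars.length := by
  induction pos with
  | nil => intro chars; rfl
  | cons p ps ih => intro chars; rw [List.foldl_cons, ih, pvStepB_length]

-- A's append-only fold over the enumeration is a map
lemma pvFoldA_map (pos : List Int) (l : List (Int × Char)) : ∀ (init : List Char),
    l.foldl (fun new p =>
        if pos.contains (p.1 + 1) then new ++ [pvR p.2] else new ++ [p.2]) init
      = init ++ l.map (fun p => if pos.contains (p.1 + 1) then pvR p.2 else p.2) := by
  induction l with
  | nil => intro init; simp
  | cons x xs ih =>
    intro init
    rw [List.foldl_cons, List.map_cons]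
    by_cases hc : pos.contains (x.1 + 1) = true
    · rw [if_pos hc, ih, if_pos hc]; simp
    · rw [if_neg hc, ih, if_neg hc]; simp

lemma pv_lists_eq (peptide : String) (pos : List Int) :
    ((PySem.List.enumerate peptide.toList).foldl
      (fun new p =>
        if pos.contains (p.1 + 1) then new ++ [pvR p.2] else new ++ [p.2]) [])
    = pos.foldl pvStepB peptide.toList := by
  set l := peptide.toList with hl
  rw [pvFoldA_map, List.nil_append]
  apply List.ext_getElem?
  intro i
  by_cases h : i < l.length
  · rw [pvFoldB_getElem pos l i h]
    rw [List.getElem?_map, PySem.List.getElem?_enumerate]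
    simp [List.getElem?_eq_getElem h]
  · have h1 : ((PySem.List.enumerate l).map
        (fun p => if pos.contains (p.1 + 1) then pvR p.2 else p.2))[i]? = none := by
      rw [List.getElem?_eq_none_iff]
      simp [PySem.List.length_enumerate]; omega
    have h2 : (pos.foldl pvStepB l)[i]? = none := by
      rw [List.getElem?_eq_none_iff, pvFoldB_length]; omega
    rw [h1, h2]

-- ===== VERDICT (by name: the statement is the Claim_ definition above) =====
theorem lowercase_modified_residue_spec : Claim_equal_lowercase_modified_residue := by
  intro peptide pos _
  unfold Spec_lowercase_modified_residue lowercase_modified_residue lowercase_modified_residue_alt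
  rw [pv_lists_eq]
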